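-- pv_equiv track=rewrite | github.com/nemowithcode/Mes-projets | Generateur_mot_de_passe/Generateur_mdp.py | trouver_mdp
-- ===== SOURCE A (Python) =====
-- symbole = [ "&", "'", "@", "!", "?", ";", ".", ":", "/",
--             "(", ")", "[", "]", "+", "°", "*", "<", ">",
--             "£", "¤", "#", "%", "§", "$", "{", "}", "-"]
--
-- chiffre = ["0", "1", "2", "3", "4", "5", "6", "7", "8", "9"]
--
-- def trouver_mdp(mdp, s, c) :
--     compteur_s = 0
--     compteur_c = 0
--     for element in mdp :
--         if element in symbole :
--             compteur_s += 1
--         elif element in chiffre :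
--             compteur_c += 1
--     if compteur_s == s and compteur_c == c :
--         return True
--     else :
--         return False
-- ===== SOURCE B (Python) =====
-- symbole = [ "&", "'", "@", "!", "?", ";", ".", ":", "/",
--             "(", ")", "[", "]", "+", "°", "*", "<", ">",
--             "£", "¤", "#", "%", "§", "$", "{", "}", "-"]
--
-- chiffre = ["0", "1", "2", "3", "4", "5", "6", "7", "8", "9"]
--
-- def trouver_mdp(mdp, s, c):
--     # Build a frequency table of the password once, then sum the counts
--     # of the fixed symbol and digit alphabets against it.
--     freq = {}
--     for ch in mdp:
--         freq[ch] = freq.get(ch, 0) + 1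
--     compteur_s = sum(freq.get(ch, 0) for ch in symbole)
--     compteur_c = sum(freq.get(ch, 0) for ch in chiffre)
--     return compteur_s == s and compteur_c == c
-- ===== Notes on version B (the rewrite author's own statement) =====
-- stated objective: faster
-- what changed: B builds a frequency dictionary of the password in one pass and then sums the counts of the 37 fixed alphabet characters, replacing A's per-character linear membership scans over the symbol/digit lists.
import Mathlib
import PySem

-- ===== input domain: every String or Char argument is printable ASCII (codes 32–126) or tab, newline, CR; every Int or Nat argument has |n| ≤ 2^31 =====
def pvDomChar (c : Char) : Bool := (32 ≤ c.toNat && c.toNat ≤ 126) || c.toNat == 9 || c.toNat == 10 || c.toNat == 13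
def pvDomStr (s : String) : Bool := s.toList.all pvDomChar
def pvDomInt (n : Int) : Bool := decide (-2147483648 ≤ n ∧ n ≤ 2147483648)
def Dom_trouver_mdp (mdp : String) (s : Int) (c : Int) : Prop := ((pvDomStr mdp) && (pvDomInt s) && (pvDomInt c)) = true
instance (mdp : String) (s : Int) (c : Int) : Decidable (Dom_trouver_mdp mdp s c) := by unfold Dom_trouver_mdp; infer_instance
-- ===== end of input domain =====

-- B builds a frequency dictionary of the password once and sums the counts of the
-- fixed alphabets, instead of A's per-character membership scans ("faster": constant factor).


-- module-level constants of the Python file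
def symbole : List Char := ['&', '\'', '@', '!', '?', ';', '.', ':', '/',
            '(', ')', '[', ']', '+', '°', '*', '<', '>',
            '£', '¤', '#', '%', '§', '$', '{', '}', '-']

def chiffre : List Char := ['0', '1', '2', '3', '4', '5', '6', '7', '8', '9']

-- ===== PORT A =====
def trouver_mdp (mdp : String) (s : Int) (c : Int) : Bool :=
  let p := mdp.toList.foldl
    (fun (acc : Int × Int) element =>
      if element ∈ symbole then (acc.1 + 1, acc.2)
      else if element ∈ chiffre then (acc.1, acc.2 + 1)
      else acc) (0, 0)
  if p.1 = s ∧ p.2 = c then true else false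

-- ===== PORT B =====
def trouver_mdp_alt (mdp : String) (s : Int) (c : Int) : Bool :=
  let freq : PySem.Dict Char Int :=
    mdp.toList.foldl (fun d ch => d.insert ch (d.getD ch 0 + 1)) PySem.Dict.empty
  let compteur_s := symbole.foldl (fun acc ch => acc + freq.getD ch 0) 0
  let compteur_c := chiffre.foldl (fun acc ch => acc + freq.getD ch 0) 0
  decide (compteur_s = s ∧ compteur_c = c)

-- ===== PRECONDITION & SPEC =====
def Spec_trouver_mdp (mdp : String) (s : Int) (c : Int) (out : Bool) : Prop := out = trouver_mdp_alt mdp s c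
instance (mdp : String) (s : Int) (c : Int) (out : Bool) : Decidable (Spec_trouver_mdp mdp s c out) := by unfold Spec_trouver_mdp; infer_instance

-- ===== CLAIM (what is proved, stated in full; the proofs are below) =====
def Claim_equal_trouver_mdp : Prop := ∀ (mdp : String) (s : Int) (c : Int), Dom_trouver_mdp mdp s c → Spec_trouver_mdp mdp s c (trouver_mdp mdp s c)

-- ===== LEMMAS AND PROOFS =====

-- sum of an equality indicator over a list is the count
lemma sum_map_ite_count (L : List Char) (x : Char) :
    (L.map fun ch => if x = ch then (1 : Int) else 0).sum = (L.count x : Int) := by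
  induction L with
  | nil => simp
  | cons y L ih =>
      by_cases h : x = y
      · subst h; simp [List.count_cons, ih, add_comm]
      · simp [List.count_cons, h, ih, Ne.symm h]

lemma sum_map_count_cons_aux (L : List Char) (x : Char) (l : List Char) :
    (L.map fun ch => ((x :: l).count ch : Int)).sum =
      (L.map fun ch => (l.count ch : Int)).sum +
        (L.map fun ch => if x = ch then (1 : Int) else 0).sum := by
  induction L with
  | nil => simp
  | cons y L ih =>
      simp only [List.map_cons, List.sum_cons, List.count_cons]
      by_cases h : x = y <;> push_cast <;> simp [h] <;> ring

-- over a Nodup list the count-sum of (x :: l) grows by the membership indicator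
lemma sum_map_count_cons (L : List Char) (hL : L.Nodup) (x : Char) (l : List Char) :
    (L.map fun ch => ((x :: l).count ch : Int)).sum =
      (L.map fun ch => (l.count ch : Int)).sum + (if x ∈ L then 1 else 0) := by
  rw [sum_map_count_cons_aux, sum_map_ite_count]
  by_cases hx : x ∈ L
  · rw [List.count_eq_one_of_mem hL hx]; simp [hx]
  · rw [List.count_eq_zero_of_not_mem hx]; simp [hx]

set_option maxRecDepth 4000 in
lemma nodup_symbole : symbole.Nodup := by decide

lemma nodup_chiffre : chiffre.Nodup := by decide

lemma disjoint_alphabets : ∀ x : Char, x ∈ chiffre → x ∉ symbole := by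
  intro x hx
  fin_cases hx <;> decide

-- A's single scan computes exactly the alphabet-count sums
lemma loopA_eq (l : List Char) (cs cc : Int) :
    l.foldl
      (fun (acc : Int × Int) element =>
        if element ∈ symbole then (acc.1 + 1, acc.2)
        else if element ∈ chiffre then (acc.1, acc.2 + 1)
        else acc) (cs, cc) =
      (cs + (symbole.map fun ch => (l.count ch : Int)).sum,
       cc + (chiffre.map fun ch => (l.count ch : Int)).sum) := by
  induction l generalizing cs cc with
  | nil => simp
  | cons x l ih =>
      simp only [List.foldl_cons]
      rw [sum_map_count_cons symbole nodup_symbole x l,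
          sum_map_count_cons chiffre nodup_chiffre x l]
      by_cases hs : x ∈ symbole
      · have hc : x ∉ chiffre := fun hc => disjoint_alphabets x hc hs
        simp only [hs, hc, if_pos, ih]
        simp; ring
      · by_cases hc : x ∈ chiffre
        · simp only [hs, hc, if_pos, ih]
          simp; ring
        · simp only [hs, hc, ih]
          simp

-- B's alphabet fold over the frequency dict is the same count-sum
lemma loopB_eq (L l : List Char) :
    L.foldl (fun acc ch =>
        acc + (l.foldl (fun (d : PySem.Dict Char Int) ch => d.insert ch (d.getD ch 0 + 1))
                PySem.Dict.empty).getD ch 0) (0 : Int) =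
      (L.map fun ch => (l.count ch : Int)).sum := by
  have hfreq : ∀ ch : Char,
      (l.foldl (fun (d : PySem.Dict Char Int) ch => d.insert ch (d.getD ch 0 + 1))
        PySem.Dict.empty).getD ch 0 = (l.count ch : Int) := by
    intro ch
    rw [PySem.Dict.getD_foldl_insert_add_one]
    simp [PySem.Dict.getD_empty]
  calc L.foldl (fun acc ch =>
        acc + (l.foldl (fun (d : PySem.Dict Char Int) ch => d.insert ch (d.getD ch 0 + 1))
                PySem.Dict.empty).getD ch 0) (0 : Int)
      = L.foldl (fun acc ch => acc + (l.count ch : Int)) (0 : Int) := by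
        apply PySem.List.foldl_congr_mem
        intro a x _; rw [hfreq]
    _ = (L.map fun ch => (l.count ch : Int)).sum := by
        rw [PySem.List.foldl_add]; simp

-- ===== VERDICT (by name: the statement is the Claim_ definition above) =====
theorem trouver_mdp_spec : Claim_equal_trouver_mdp := by
  intro mdp s c _
  unfold Spec_trouver_mdp trouver_mdp trouver_mdp_alt
  simp only [loopA_eq, loopB_eq]
  simp
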